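-- pv_equiv track=rewrite | github.com/Steffan005/40Hz-Harmonic-AI | tools/dream_analyzer.py | _archetypal_summary
-- ===== SOURCE A (Python) =====
-- from typing import Dict, List, Set
--
-- def _archetypal_summary(symbols: List[Dict], themes: List[str]) -> str:
--     """Generate archetypal pattern summary"""
--     if not symbols:
--         return "No clear archetypal patterns detected."
--
--     archetypes = []
--
--     # Check for hero's journey
--     if 'journey' in themes or 'quest' in [s['symbol'] for s in symbols]:
--         archetypes.append("Hero's Journey (individuation process)")
--
--     # Check for shadow work
--     if 'shadow' in themes or any(s['symbol'] in ['snake', 'monster', 'darkness'] for s in symbols):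
--         archetypes.append("Shadow Integration")
--
--     # Check for anima/animus
--     if any(s['symbol'] in ['woman', 'man'] for s in symbols):
--         archetypes.append("Anima/Animus Encounter")
--
--     # Check for death/rebirth
--     if 'transformation' in themes or any(s['symbol'] in ['death', 'birth'] for s in symbols):
--         archetypes.append("Death and Rebirth")
--
--     if archetypes:
--         return f"Archetypal patterns: {', '.join(archetypes)}"
--     else:
--         return "Personal symbolism predominant - specific to dreamer's life context."
-- ===== SOURCE B (Python) =====
-- def _archetypal_summary(symbols, themes):
--     """Generate archetypal pattern summary (single-pass inverted index)."""
--     if not symbols: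
--         return "No clear archetypal patterns detected."
--
--     SYMBOL_TO_RULE = {'quest': 0, 'snake': 1, 'monster': 1, 'darkness': 1,
--                       'woman': 2, 'man': 2, 'death': 3, 'birth': 3}
--     THEME_TO_RULE = {'journey': 0, 'shadow': 1, 'transformation': 3}
--
--     hit = [False, False, False, False]
--     for s in symbols:
--         r = SYMBOL_TO_RULE.get(s['symbol'])
--         if r is not None:
--             hit[r] = True
--     for t in themes:
--         r = THEME_TO_RULE.get(t)
--         if r is not None:
--             hit[r] = True
--
--     LABELS = ["Hero's Journey (individuation process)", "Shadow Integration",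
--               "Anima/Animus Encounter", "Death and Rebirth"]
--     archetypes = [lab for h, lab in zip(hit, LABELS) if h]
--
--     if archetypes:
--         return "Archetypal patterns: " + ", ".join(archetypes)
--     return "Personal symbolism predominant - specific to dreamer's life context."
-- ===== Notes on version B (the rewrite author's own statement) =====
-- stated objective: alternative
-- what changed: Instead of scanning the data once per rule, B makes a single pass over the symbols and a single pass over the themes, using an inverted index (keyword -> rule number) to set a flag array, then emits the labels of the set flags.
import Mathlib
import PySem

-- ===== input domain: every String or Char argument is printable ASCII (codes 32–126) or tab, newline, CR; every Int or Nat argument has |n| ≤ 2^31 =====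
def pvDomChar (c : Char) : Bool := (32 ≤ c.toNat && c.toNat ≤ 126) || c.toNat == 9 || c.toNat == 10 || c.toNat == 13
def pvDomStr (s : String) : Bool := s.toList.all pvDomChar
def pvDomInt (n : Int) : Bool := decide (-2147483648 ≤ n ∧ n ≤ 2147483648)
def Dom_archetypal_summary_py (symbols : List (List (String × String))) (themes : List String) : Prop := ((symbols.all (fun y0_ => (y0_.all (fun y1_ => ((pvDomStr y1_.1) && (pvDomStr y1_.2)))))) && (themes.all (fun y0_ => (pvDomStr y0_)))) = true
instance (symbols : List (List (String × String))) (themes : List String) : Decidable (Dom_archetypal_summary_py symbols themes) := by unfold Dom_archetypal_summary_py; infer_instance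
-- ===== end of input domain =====

-- B replaces A's per-rule scans by a single pass over symbols and themes with an inverted
-- keyword->rule index setting a flag array (objective: alternative decomposition, same cost class).


-- s['symbol']: Python dict lookup (first match). Total via default ""; exact under Pre_ (every dict has the key).
def pvSym (s : List (String × String)) : String :=
  ((PySem.Dict.mk s).get? "symbol").getD ""

-- ===== PORT A =====
def archetypal_summary_py (symbols : List (List (String × String))) (themes : List String) : String :=
  if symbols = [] then "No clear archetypal patterns detected."
  else
    let archetypes : List String := []
    let archetypes := if themes.contains "journey" || (symbols.map pvSym).contains "quest"
      then archetypes ++ ["Hero's Journey (individuation process)"] else archetypes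
    let archetypes := if themes.contains "shadow" || symbols.any (fun s => ["snake", "monster", "darkness"].any (fun x => pvSym s == x))
      then archetypes ++ ["Shadow Integration"] else archetypes
    let archetypes := if symbols.any (fun s => ["woman", "man"].contains (pvSym s))
      then archetypes ++ ["Anima/Animus Encounter"] else archetypes
    let archetypes := if themes.contains "transformation" || symbols.any (fun s => ["death", "birth"].any (fun x => pvSym s == x))
      then archetypes ++ ["Death and Rebirth"] else archetypes
    if archetypes ≠ [] then "Archetypal patterns: " ++ PySem.Str.join ", " archetypes
    else "Personal symbolism predominant - specific to dreamer's life context."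

-- ===== PORT B =====
-- SYMBOL_TO_RULE / THEME_TO_RULE: B's inverted keyword -> rule-number indexes.
def pvSymRuleDict : PySem.Dict String Int :=
  PySem.Dict.mk [("quest", 0), ("snake", 1), ("monster", 1), ("darkness", 1),
                 ("woman", 2), ("man", 2), ("death", 3), ("birth", 3)]
def pvThemeRuleDict : PySem.Dict String Int :=
  PySem.Dict.mk [("journey", 0), ("shadow", 1), ("transformation", 3)]

def archetypal_summary_py_alt (symbols : List (List (String × String))) (themes : List String) : String :=
  if symbols = [] then "No clear archetypal patterns detected."
  else
    let hit : List Bool := [false, false, false, false]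
    let hit := symbols.foldl (fun h s =>
      match pvSymRuleDict.get? (pvSym s) with
      | some r => PySem.List.pySetD h r true
      | none => h) hit
    let hit := themes.foldl (fun h t =>
      match pvThemeRuleDict.get? t with
      | some r => PySem.List.pySetD h r true
      | none => h) hit
    let labels : List String := ["Hero's Journey (individuation process)", "Shadow Integration",
                                 "Anima/Animus Encounter", "Death and Rebirth"]
    let archetypes := (hit.zip labels).filterMap (fun p => if p.1 then some p.2 else none)
    if archetypes ≠ [] then "Archetypal patterns: " ++ PySem.Str.join ", " archetypes
    else "Personal symbolism predominant - specific to dreamer's life context."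

-- ===== PRECONDITION & SPEC =====
-- Pre_ excludes inputs where some symbol dict lacks the key 'symbol', on which Python A raises KeyError
-- (except for a narrow short-circuit sliver where A still returns; B raises there too — see claim cites).
def Pre_archetypal_summary_py (symbols : List (List (String × String))) (themes : List String) : Prop :=
  (symbols.all (fun s => s.any (fun p => p.1 == "symbol"))) = true
instance (symbols : List (List (String × String))) (themes : List String) : Decidable (Pre_archetypal_summary_py symbols themes) := by unfold Pre_archetypal_summary_py; infer_instance

def pvWitness_archetypal_summary_py : (List (List (String × String))) × List String :=
  ([[("symbol", "quest")], [("symbol", "cat")]], ["shadow"])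

def Spec_archetypal_summary_py (symbols : List (List (String × String))) (themes : List String) (out : String) : Prop := out = archetypal_summary_py_alt symbols themes
instance (symbols : List (List (String × String))) (themes : List String) (out : String) : Decidable (Spec_archetypal_summary_py symbols themes out) := by unfold Spec_archetypal_summary_py; infer_instance

-- ===== CLAIM (what is proved, stated in full; the proofs are below) =====
def Claim_equal_archetypal_summary_py : Prop := ∀ (symbols : List (List (String × String))) (themes : List String), Dom_archetypal_summary_py symbols themes → Pre_archetypal_summary_py symbols themes → Spec_archetypal_summary_py symbols themes (archetypal_summary_py symbols themes)

-- ===== LEMMAS AND PROOFS =====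

-- The inverted indexes hit only rule numbers 0..3.
theorem symRule_cases (x : String) :
    pvSymRuleDict.get? x = none ∨ pvSymRuleDict.get? x = some 0 ∨ pvSymRuleDict.get? x = some 1 ∨
    pvSymRuleDict.get? x = some 2 ∨ pvSymRuleDict.get? x = some 3 := by
  simp only [pvSymRuleDict, PySem.Dict.get?_mk_cons]
  split_ifs <;> simp [PySem.Dict.get?]

theorem themeRule_cases (x : String) :
    pvThemeRuleDict.get? x = none ∨ pvThemeRuleDict.get? x = some 0 ∨ pvThemeRuleDict.get? x = some 1 ∨
    pvThemeRuleDict.get? x = some 3 := by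
  simp only [pvThemeRuleDict, PySem.Dict.get?_mk_cons]
  split_ifs <;> simp [PySem.Dict.get?]

-- B's single pass over the symbols computes, per rule, A's per-rule membership scan.
theorem symFold (symbols : List (List (String × String))) (a b c d : Bool) :
    symbols.foldl (fun h s =>
      match pvSymRuleDict.get? (pvSym s) with
      | some r => PySem.List.pySetD h r true
      | none => h) [a, b, c, d] =
    [a || symbols.any (fun s => pvSymRuleDict.get? (pvSym s) == some 0),
     b || symbols.any (fun s => pvSymRuleDict.get? (pvSym s) == some 1),
     c || symbols.any (fun s => pvSymRuleDict.get? (pvSym s) == some 2),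
     d || symbols.any (fun s => pvSymRuleDict.get? (pvSym s) == some 3)] := by
  induction symbols generalizing a b c d with
  | nil => simp
  | cons s t ih =>
    rcases symRule_cases (pvSym s) with h | h | h | h | h <;>
      simp [h, ih, PySem.List.pySetD_of_nonneg, List.set]

-- B's single pass over the themes computes, per rule, A's theme membership tests.
theorem themeFold (themes : List String) (a b c d : Bool) :
    themes.foldl (fun h t =>
      match pvThemeRuleDict.get? t with
      | some r => PySem.List.pySetD h r true
      | none => h) [a, b, c, d] =
    [a || themes.any (fun t => pvThemeRuleDict.get? t == some 0),
     b || themes.any (fun t => pvThemeRuleDict.get? t == some 1),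
     c,
     d || themes.any (fun t => pvThemeRuleDict.get? t == some 3)] := by
  induction themes generalizing a b c d with
  | nil => simp
  | cons s t ih =>
    rcases themeRule_cases s with h | h | h | h <;>
      simp [h, ih, PySem.List.pySetD_of_nonneg, List.set]

-- index hit ↔ the literal keyword tests A performs
theorem symRule_eq0 (x : String) : (pvSymRuleDict.get? x == some 0) = ("quest" == x) := by
  simp only [pvSymRuleDict, PySem.Dict.get?_mk_cons, beq_iff_eq]
  split_ifs with h1 h2 h3 h4 h5 h6 h7 h8 <;> subst_vars <;> simp [PySem.Dict.get?]
  exact h1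

theorem symRule_eq1 (x : String) :
    (pvSymRuleDict.get? x == some 1) = (["snake", "monster", "darkness"].contains x) := by
  simp only [pvSymRuleDict, PySem.Dict.get?_mk_cons, beq_iff_eq]
  split_ifs with h1 h2 h3 h4 h5 h6 h7 h8 <;> subst_vars <;> simp [PySem.Dict.get?]
  exact ⟨fun h => h2 h.symm, fun h => h3 h.symm, fun h => h4 h.symm⟩

theorem symRule_eq2 (x : String) :
    (pvSymRuleDict.get? x == some 2) = (["woman", "man"].contains x) := by
  simp only [pvSymRuleDict, PySem.Dict.get?_mk_cons, beq_iff_eq]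
  split_ifs with h1 h2 h3 h4 h5 h6 h7 h8 <;> subst_vars <;> simp [PySem.Dict.get?]
  exact ⟨fun h => h5 h.symm, fun h => h6 h.symm⟩

theorem symRule_eq3 (x : String) :
    (pvSymRuleDict.get? x == some 3) = (["death", "birth"].contains x) := by
  simp only [pvSymRuleDict, PySem.Dict.get?_mk_cons, beq_iff_eq]
  split_ifs with h1 h2 h3 h4 h5 h6 h7 h8 <;> subst_vars <;> simp [PySem.Dict.get?]
  exact ⟨fun h => h7 h.symm, fun h => h8 h.symm⟩

theorem themeRule_eq0 (x : String) : (pvThemeRuleDict.get? x == some 0) = ("journey" == x) := by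
  simp only [pvThemeRuleDict, PySem.Dict.get?_mk_cons, beq_iff_eq]
  split_ifs with h1 h2 h3 <;> subst_vars <;> simp [PySem.Dict.get?]
  exact h1

theorem themeRule_eq1 (x : String) : (pvThemeRuleDict.get? x == some 1) = ("shadow" == x) := by
  simp only [pvThemeRuleDict, PySem.Dict.get?_mk_cons, beq_iff_eq]
  split_ifs with h1 h2 h3 <;> subst_vars <;> simp [PySem.Dict.get?]
  exact h2

theorem themeRule_eq3 (x : String) : (pvThemeRuleDict.get? x == some 3) = ("transformation" == x) := by
  simp only [pvThemeRuleDict, PySem.Dict.get?_mk_cons, beq_iff_eq]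
  split_ifs with h1 h2 h3 <;> subst_vars <;> simp [PySem.Dict.get?]
  exact h3

-- ===== VERDICT (by name: the statement is the Claim_ definition above) =====
theorem archetypal_summary_py_spec : Claim_equal_archetypal_summary_py := by
  intro symbols themes _ _
  unfold Spec_archetypal_summary_py archetypal_summary_py archetypal_summary_py_alt
  by_cases hs : symbols = []
  · simp [hs]
  · simp only [if_neg hs, symFold, themeFold, Bool.false_or]
    simp only [symRule_eq0, symRule_eq1, symRule_eq2, symRule_eq3,
      themeRule_eq0, themeRule_eq1, themeRule_eq3]
    simp only [List.contains_eq_any_beq, List.any_map, Function.comp_def]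
    rcases Bool.eq_false_or_eq_true (themes.any (fun t => "journey" == t)) with h1 | h1 <;>
    rcases Bool.eq_false_or_eq_true (symbols.any (fun s => "quest" == pvSym s)) with h2 | h2 <;>
    rcases Bool.eq_false_or_eq_true (themes.any (fun t => "shadow" == t)) with h3 | h3 <;>
    rcases Bool.eq_false_or_eq_true (symbols.any (fun s => ["snake", "monster", "darkness"].any (fun x => pvSym s == x))) with h4 | h4 <;>
    rcases Bool.eq_false_or_eq_true (symbols.any (fun s => ["woman", "man"].any (fun x => pvSym s == x))) with h5 | h5 <;>
    rcases Bool.eq_false_or_eq_true (themes.any (fun t => "transformation" == t)) with h6 | h6 <;>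
    rcases Bool.eq_false_or_eq_true (symbols.any (fun s => ["death", "birth"].any (fun x => pvSym s == x))) with h7 | h7 <;>
    simp only [h1, h2, h3, h4, h5, h6, h7, Bool.or_false, Bool.or_true] <;> rfl
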